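-- pv_equiv track=rewrite | github.com/Rafal-Grudziak/signature-verifier | trng.py | convert_bits_to_decimal
-- ===== SOURCE A (Python) =====
-- def convert_bits_to_decimal(bits, chunk_size=8):
--     # Convert the list of bits into a list of decimal numbers
--     decimals = []
--     # Process each chunk of 8 bits
--     for i in range(0, len(bits), chunk_size):
--         # Get a slice of the list that represents one byte (8 bits)
--         chunk = bits[i:i + chunk_size]
--         # Break the loop if the last chunk is not a full byte
--         if len(chunk) < chunk_size:
--             break
--         # Convert the binary number in chunk to a decimal number
--         decimal = int(''.join(map(str, chunk)), 2)
--         # Append the decimal number to the list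
--         decimals.append(decimal)
--     return decimals
-- ===== SOURCE B (Python) =====
-- def convert_bits_to_decimal(bits, chunk_size=8):
--     # Single streaming pass: collect bits into a buffer, flush every full chunk.
--     decimals = []
--     buffer = []
--     for bit in bits:
--         buffer.append(bit)
--         if len(buffer) == chunk_size:
--             decimals.append(int(''.join(map(str, buffer)), 2))
--             buffer = []
--     return decimals
-- ===== Notes on version B (the rewrite author's own statement) =====
-- stated objective: alternative
-- what changed: Replaces A's range/slice indexing loop (compute a slice per index, break on a short chunk) by a single streaming pass that appends each bit to a buffer and flushes the buffer into the result whenever it reaches chunk_size; a trailing partial chunk is dropped by never flushing the buffer.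
-- outside the precondition, e.g. on convert_bits_to_decimal([-1], 1): A returns [-1], B returns [-1]; on convert_bits_to_decimal([-1, 0], 2): A returns [-2], B returns [-2]
import Mathlib
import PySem

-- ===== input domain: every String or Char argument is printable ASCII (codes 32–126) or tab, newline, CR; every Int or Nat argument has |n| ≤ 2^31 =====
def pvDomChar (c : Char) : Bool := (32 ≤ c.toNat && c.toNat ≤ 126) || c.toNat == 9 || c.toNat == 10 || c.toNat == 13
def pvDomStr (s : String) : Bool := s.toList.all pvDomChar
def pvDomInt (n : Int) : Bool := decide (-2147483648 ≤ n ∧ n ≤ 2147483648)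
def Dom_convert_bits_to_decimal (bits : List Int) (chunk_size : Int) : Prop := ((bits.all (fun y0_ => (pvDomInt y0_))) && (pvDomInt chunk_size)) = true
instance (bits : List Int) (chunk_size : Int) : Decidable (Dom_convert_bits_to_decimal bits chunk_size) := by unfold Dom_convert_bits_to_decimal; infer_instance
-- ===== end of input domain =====

-- B replaces A's range/slice indexing loop by a single streaming pass with a chunk buffer (alternative decomposition, same cost); return values only, no mutation involved.

-- ===== PORT A =====
-- int(''.join(map(str, chunk)), 2); Python raises ValueError where ofCharsBase? = none —
-- those inputs are excluded by Pre_, the .getD 0 default is never reached there.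
def pvConv (chunk : List Int) : Int :=
  (PySem.Int.ofCharsBase? ((chunk.map PySem.Int.toChars).foldl (· ++ ·) []) 2).getD 0

-- A: for i in range(0, len(bits), chunk_size): slice a chunk, break if short, else append.
-- The 'break' is modelled by a Bool flag in the fold state (True = loop exited).
def convert_bits_to_decimal (bits : List Int) (chunk_size : Int) : List Int :=
  ((PySem.List.pyRange 0 (bits.length : Int) chunk_size).foldl
    (fun st i =>
      if st.2 then st
      else
        let chunk := PySem.List.slice bits (some i) (some (i + chunk_size))
        if (chunk.length : Int) < chunk_size then (st.1, true)
        else (st.1 ++ [pvConv chunk], false))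
    ([], false)).1

-- ===== PORT B =====
-- B: one streaming pass; append each bit to a buffer, flush it whenever it reaches chunk_size.
def convert_bits_to_decimal_alt (bits : List Int) (chunk_size : Int) : List Int :=
  (bits.foldl
    (fun st bit =>
      let buffer := st.2 ++ [bit]
      if (buffer.length : Int) = chunk_size then (st.1 ++ [pvConv buffer], ([] : List Int))
      else (st.1, buffer))
    (([] : List Int), ([] : List Int))).1

-- ===== PRECONDITION & SPEC =====
-- Pre_ excludes chunk_size = 0, where A's range(0, len, 0) raises ValueError, and non-0/1 bits
-- inside the full chunks, where int(''.join(...), 2) almost always raises ValueError (a handful of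
-- accidental corners such as a chunk-initial -1 still return, and A and B return the same value there).
def Pre_convert_bits_to_decimal (bits : List Int) (chunk_size : Int) : Prop :=
  chunk_size < 0 ∨ (0 < chunk_size ∧ ∀ i : Nat, i < bits.length →
    i < chunk_size.toNat * (bits.length / chunk_size.toNat) → bits.getD i 0 = 0 ∨ bits.getD i 0 = 1)
instance (bits : List Int) (chunk_size : Int) : Decidable (Pre_convert_bits_to_decimal bits chunk_size) := by unfold Pre_convert_bits_to_decimal; infer_instance
def pvWitness_convert_bits_to_decimal : List Int × Int := ([1, 0, 1, 1, 0], 2)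

def Spec_convert_bits_to_decimal (bits : List Int) (chunk_size : Int) (out : List Int) : Prop := out = convert_bits_to_decimal_alt bits chunk_size
instance (bits : List Int) (chunk_size : Int) (out : List Int) : Decidable (Spec_convert_bits_to_decimal bits chunk_size out) := by unfold Spec_convert_bits_to_decimal; infer_instance

-- ===== CLAIM (what is proved, stated in full; the proofs are below) =====
def Claim_equal_convert_bits_to_decimal : Prop := ∀ (bits : List Int) (chunk_size : Int), Dom_convert_bits_to_decimal bits chunk_size → Pre_convert_bits_to_decimal bits chunk_size → Spec_convert_bits_to_decimal bits chunk_size (convert_bits_to_decimal bits chunk_size)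

-- ===== LEMMAS AND PROOFS =====

-- the common chunking both programs compute for a positive chunk size
def pvChunks (cs : Int) (l : List Int) : List Int :=
  if h : 0 < cs ∧ cs ≤ (l.length : Int) then
    pvConv (l.take cs.toNat) :: pvChunks cs (l.drop cs.toNat)
  else []
termination_by l.length
decreasing_by simp only [List.length_drop]; omega

lemma pvChunks_nil (cs : Int) : pvChunks cs [] = [] := by
  rw [pvChunks]; simp

-- range with positive step, first element peeled off
lemma pyRange_pos_cons (a b s : Int) (hs : 0 < s) (hab : a < b) :
    PySem.List.pyRange a b s = a :: PySem.List.pyRange (a + s) b s := by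
  rw [PySem.List.pyRange_of_pos a b hs, PySem.List.pyRange_of_pos (a + s) b hs]
  have hkey : ((b - a + s - 1) / s).toNat
      = (if a + s < b then ((b - (a + s) + s - 1) / s).toNat else 0) + 1 := by
    have h1 : b - a + s - 1 = (b - a - 1) + 1 * s := by ring
    rw [h1, Int.add_mul_ediv_right _ _ (by omega : s ≠ 0)]
    by_cases hlt : a + s < b
    · simp only [hlt, if_true]
      have : b - (a + s) + s - 1 = b - a - 1 := by ring
      rw [this]
      have : 0 ≤ (b - a - 1) / s := Int.ediv_nonneg (by omega) (by omega)
      omega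
    · simp only [hlt, if_false]
      have : (b - a - 1) / s = 0 := Int.ediv_eq_zero_of_lt (by omega) (by omega)
      omega
  rw [if_pos hab, hkey, List.range_succ_eq_map, List.map_cons, List.map_map]
  congr 1
  · simp
  · apply List.map_congr_left
    intro k _
    simp only [Function.comp_apply]
    push_cast
    ring

lemma pyRange_pos_nil (a b s : Int) (hs : 0 < s) (hab : b ≤ a) :
    PySem.List.pyRange a b s = [] := by
  rw [PySem.List.pyRange_of_pos a b hs, if_neg (by omega)]
  simp

lemma pyRange_neg_nil (a b s : Int) (hs : s < 0) (hab : a ≤ b) :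
    PySem.List.pyRange a b s = [] := by
  simp only [PySem.List.pyRange, if_neg (by omega : ¬ s = 0), if_neg (by omega : ¬ 0 < s),
    if_neg (by omega : ¬ b < a), List.range_zero, List.map_nil]

-- once A has broken out of the loop, the state never changes again
lemma loopA_stopped (bits : List Int) (cs : Int) (l : List Int) (d : List Int) :
    (l.foldl
      (fun st i =>
        if st.2 then st
        else
          let chunk := PySem.List.slice bits (some i) (some (i + cs))
          if (chunk.length : Int) < cs then (st.1, true)
          else (st.1 ++ [pvConv chunk], false))
      (d, true)) = (d, true) := by
  induction l with
  | nil => rfl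
  | cons x xs ih => simpa using ih

-- A's loop from offset a computes the chunks of the suffix bits.drop a.toNat
lemma loopA_char (bits : List Int) (cs : Int) (hcs : 0 < cs) :
    ∀ (n : Nat) (a : Int) (d : List Int), 0 ≤ a → n = bits.length - a.toNat →
    ((PySem.List.pyRange a (bits.length : Int) cs).foldl
      (fun st i =>
        if st.2 then st
        else
          let chunk := PySem.List.slice bits (some i) (some (i + cs))
          if (chunk.length : Int) < cs then (st.1, true)
          else (st.1 ++ [pvConv chunk], false))
      (d, false)).1 = d ++ pvChunks cs (bits.drop a.toNat) := by
  intro n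
  induction n using Nat.strong_induction_on with
  | _ n ih =>
    intro a d ha hn
    by_cases hab : a < (bits.length : Int)
    · rw [pyRange_pos_cons a _ cs hcs hab, List.foldl_cons]
      have hsl : PySem.List.slice bits (some a) (some (a + cs))
          = (bits.drop a.toNat).take cs.toNat := by
        rw [PySem.List.slice_toNat bits ha (by omega)]
        congr 1
        omega
      simp only [if_neg (by simp : ¬ (false = true)), hsl]
      set r := bits.drop a.toNat with hr
      have hrlen : r.length = bits.length - a.toNat := by simp [hr]
      have htn : (a + cs).toNat = a.toNat + cs.toNat := by omega
      by_cases hshort : ((r.take cs.toNat).length : Int) < cs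
      · rw [if_pos hshort, loopA_stopped]
        have hlt : (r.length : Int) < cs := by
          simp only [List.length_take] at hshort
          omega
        rw [pvChunks, dif_neg (by omega)]
        simp
      · rw [if_neg hshort]
        have hge : cs.toNat ≤ r.length := by
          simp only [List.length_take] at hshort
          omega
        have hrec := ih (bits.length - (a + cs).toNat) (by omega) (a + cs)
          (d ++ [pvConv (r.take cs.toNat)]) (by omega) rfl
        rw [hrec]
        have hdrop : bits.drop (a + cs).toNat = r.drop cs.toNat := by
          rw [hr, List.drop_drop, htn, Nat.add_comm]
        rw [hdrop]
        conv_rhs => rw [pvChunks]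
        rw [dif_pos ⟨hcs, by omega⟩]
        simp
    · rw [pyRange_pos_nil a _ cs hcs (by omega)]
      have : bits.drop a.toNat = [] := by
        apply List.drop_eq_nil_of_le
        omega
      simp [this, pvChunks_nil]

-- B's streaming pass with a partial buffer computes the chunks of buffer ++ bits
lemma loopB_char (cs : Int) (hcs : 0 < cs) :
    ∀ (bits d buf : List Int), (buf.length : Int) < cs →
    (bits.foldl
      (fun st bit =>
        let buffer := st.2 ++ [bit]
        if (buffer.length : Int) = cs then (st.1 ++ [pvConv buffer], ([] : List Int))
        else (st.1, buffer))
      (d, buf)).1 = d ++ pvChunks cs (buf ++ bits) := by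
  intro bits
  induction bits with
  | nil =>
    intro d buf hbuf
    simp only [List.foldl_nil, List.append_nil]
    rw [pvChunks, dif_neg (by omega)]
    simp
  | cons bit rest ih =>
    intro d buf hbuf
    simp only [List.foldl_cons]
    have hlen1 : (buf ++ [bit]).length = buf.length + 1 := by simp
    by_cases hfull : (((buf ++ [bit]).length : Int)) = cs
    · rw [if_pos hfull]
      have hnil : (([] : List Int).length : Int) < cs := by simp; omega
      rw [ih (d ++ [pvConv (buf ++ [bit])]) [] hnil, List.nil_append]
      have hlen : (buf ++ [bit]).length = cs.toNat := by omega
      conv_rhs => rw [pvChunks]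
      rw [dif_pos ⟨hcs, by simp; omega⟩]
      have hsplit : buf ++ bit :: rest = (buf ++ [bit]) ++ rest := by simp
      have htake : (buf ++ bit :: rest).take cs.toNat = buf ++ [bit] := by
        rw [hsplit, List.take_append_of_le_length (by omega), List.take_of_length_le (by omega)]
      have hdrop : (buf ++ bit :: rest).drop cs.toNat = rest := by
        rw [hsplit, List.drop_append_of_le_length (by omega), List.drop_of_length_le (by omega),
          List.nil_append]
      rw [htake, hdrop]
      simp
    · rw [if_neg hfull]
      rw [ih d (buf ++ [bit]) (by omega)]
      simp

-- B returns [] for a negative chunk size: the buffer can never have negative length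
lemma loopB_neg (cs : Int) (hcs : cs < 0) :
    ∀ (bits d buf : List Int),
    (bits.foldl
      (fun st bit =>
        let buffer := st.2 ++ [bit]
        if (buffer.length : Int) = cs then (st.1 ++ [pvConv buffer], ([] : List Int))
        else (st.1, buffer))
      (d, buf)).1 = d := by
  intro bits
  induction bits with
  | nil => intro d buf; rfl
  | cons bit rest ih =>
    intro d buf
    simp only [List.foldl_cons]
    rw [if_neg (by simp; omega)]
    exact ih d (buf ++ [bit])

-- ===== VERDICT (by name: the statement is the Claim_ definition above) =====
theorem convert_bits_to_decimal_spec : Claim_equal_convert_bits_to_decimal := by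
  intro bits cs _ hpre
  unfold Spec_convert_bits_to_decimal convert_bits_to_decimal convert_bits_to_decimal_alt
  rcases lt_trichotomy cs 0 with hneg | hzero | hpos
  · rw [pyRange_neg_nil 0 _ cs hneg (by positivity), List.foldl_nil, loopB_neg cs hneg]
  · rcases hpre with h | h
    · omega
    · omega
  · rw [loopA_char bits cs hpos (bits.length - (0 : Int).toNat) 0 [] le_rfl rfl,
      loopB_char cs hpos bits [] [] (by simpa using hpos)]
    simp
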